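-- pv_equiv track=rewrite | github.com/VaninaBlas/Guias | guia8/ejercicio12.py | maximo_valor_entero
-- ===== SOURCE A (Python) =====
-- def maximo_valor_entero(dic:dict[str,int])->set[str]:
--     """
--     Requiere:
--     Devuelve:el m치ximo valor entero de un diccionario de strings a enteros (es decir, dict[str,int])
--     y devuelva el conjunto de claves que tienen dicho valor.
--     """
--     may=0
--     vr:set[str]=set()
--     for k,v in dic.items():
--         if v>=may:
--             may=v
--     for k in dic:
--         if dic[k]==may:
--             vr.add(k)
--     return vr
-- ===== SOURCE B (Python) =====
-- def maximo_valor_entero(dic: dict[str, int]) -> set[str]: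
--     # One pass: maintain the running maximum (floored at 0, as the task's
--     # behaviour requires) together with the set of keys attaining it.
--     may = 0
--     vr: set[str] = set()
--     for k, v in dic.items():
--         if v > may:
--             may = v
--             vr = {k}
--         elif v == may:
--             vr.add(k)
--     return vr
-- ===== Notes on version B (the rewrite author's own statement) =====
-- stated objective: alternative
-- what changed: Replaces A's two passes (first compute the floored maximum, then re-scan the dict with dic[k] lookups to collect keys) by a single pass that maintains the running maximum and the set of keys attaining it together, resetting the set on a strict improvement.
import Mathlib
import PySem

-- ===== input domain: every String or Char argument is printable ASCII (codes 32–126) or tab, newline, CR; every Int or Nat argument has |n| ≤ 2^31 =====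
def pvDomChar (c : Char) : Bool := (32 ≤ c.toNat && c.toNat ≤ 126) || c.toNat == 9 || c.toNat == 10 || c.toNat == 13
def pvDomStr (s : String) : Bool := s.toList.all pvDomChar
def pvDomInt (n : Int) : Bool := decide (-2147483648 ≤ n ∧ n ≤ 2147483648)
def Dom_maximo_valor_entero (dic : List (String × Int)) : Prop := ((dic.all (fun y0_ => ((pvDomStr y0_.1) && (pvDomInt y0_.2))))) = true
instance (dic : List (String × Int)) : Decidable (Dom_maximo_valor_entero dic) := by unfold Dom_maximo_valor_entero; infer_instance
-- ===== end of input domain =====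

-- B folds A's two passes (max first, then re-scan with dic[k] lookups) into one pass
-- maintaining the running maximum together with the set of keys attaining it (alternative, same cost).


-- ===== PORT A =====
-- Python dic[k] always succeeds here (k ranges over dic's own keys), so 'dic[k] == may'
-- is ported exactly as 'get? dic k == some may'.
def maximo_valor_entero (dic : List (String × Int)) : List String :=
  let may : Int := dic.foldl (fun may kv => if kv.2 ≥ may then kv.2 else may) 0
  dic.foldl
    (fun vr kv =>
      if (PySem.Dict.mk dic).get? kv.1 == some may then PySem.Set.add vr kv.1 else vr)
    (PySem.Set.ofList ([] : List String))

-- ===== PORT B =====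
def maximo_valor_entero_alt (dic : List (String × Int)) : List String :=
  (dic.foldl
    (fun s kv =>
      if kv.2 > s.1 then (kv.2, PySem.Set.ofList [kv.1])
      else if kv.2 == s.1 then (s.1, PySem.Set.add s.2 kv.1)
      else s)
    ((0 : Int), PySem.Set.ofList ([] : List String))).2

-- ===== PRECONDITION & SPEC =====
-- Pre_ excludes association lists with duplicate keys, which do not represent any Python
-- dict (the Python argument is dict[str,int], whose keys are unique), so no input A
-- actually returns on is excluded.
def Pre_maximo_valor_entero (dic : List (String × Int)) : Prop :=
  (dic.map Prod.fst).Nodup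
instance (dic : List (String × Int)) : Decidable (Pre_maximo_valor_entero dic) := by
  unfold Pre_maximo_valor_entero; infer_instance
def pvWitness_maximo_valor_entero : (List (String × Int)) := [("a", 1), ("b", 2), ("c", 2)]

def Spec_maximo_valor_entero (dic : List (String × Int)) (out : List String) : Prop := out = maximo_valor_entero_alt dic
instance (dic : List (String × Int)) (out : List String) : Decidable (Spec_maximo_valor_entero dic out) := by unfold Spec_maximo_valor_entero; infer_instance

-- ===== CLAIM (what is proved, stated in full; the proofs are below) =====
def Claim_equal_maximo_valor_entero : Prop := ∀ (dic : List (String × Int)), Dom_maximo_valor_entero dic → Pre_maximo_valor_entero dic → Spec_maximo_valor_entero dic (maximo_valor_entero dic)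

-- ===== LEMMAS AND PROOFS =====

-- the running maximum of A's first pass, started at m
def pvMax (m : Int) (l : List (String × Int)) : Int :=
  l.foldl (fun m kv => if kv.2 ≥ m then kv.2 else m) m

-- keys whose value is M, in order
def pvKeysWith (l : List (String × Int)) (M : Int) : List String :=
  (l.filter (fun kv => kv.2 == M)).map Prod.fst

def pvAddAll (s : PySem.Set String) (xs : List String) : PySem.Set String :=
  xs.foldl PySem.Set.add s

-- B's loop body
def pvStep (s : Int × PySem.Set String) (kv : String × Int) : Int × PySem.Set String :=
  if kv.2 > s.1 then (kv.2, PySem.Set.ofList [kv.1])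
  else if kv.2 == s.1 then (s.1, PySem.Set.add s.2 kv.1)
  else s

lemma pvMax_ge (l : List (String × Int)) : ∀ m : Int, m ≤ pvMax m l := by
  induction l with
  | nil => intro m; simp [pvMax]
  | cons kv t ih =>
      intro m
      simp only [pvMax, List.foldl_cons]
      by_cases hc : kv.2 ≥ m
      · have h := ih kv.2
        simp only [pvMax] at h
        rw [if_pos hc]
        omega
      · have h := ih m
        simp only [pvMax] at h
        rw [if_neg hc]
        omega

lemma pvB_inv (l : List (String × Int)) :
    ∀ (m : Int) (s : PySem.Set String),
      l.foldl pvStep (m, s) =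
        (pvMax m l,
          pvAddAll (if pvMax m l = m then s else PySem.Set.ofList [])
            (pvKeysWith l (pvMax m l))) := by
  induction l with
  | nil => intro m s; simp [pvMax, pvKeysWith, pvAddAll]
  | cons kv t ih =>
      intro m s
      obtain ⟨k, v⟩ := kv
      simp only [List.foldl_cons]
      rcases lt_trichotomy m v with hlt | heq | hgt
      · -- v > m : reset
        have hstep : pvStep (m, s) (k, v) = (v, PySem.Set.ofList [k]) := by
          simp [pvStep, hlt]
        rw [hstep, ih]
        have hmax : pvMax m ((k, v) :: t) = pvMax v t := by
          simp [pvMax, le_of_lt hlt]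
        have hge : v ≤ pvMax v t := pvMax_ge t v
        have hne : pvMax v t ≠ m := by omega
        rw [hmax, if_neg hne]
        by_cases hv : pvMax v t = v
        · have : pvKeysWith ((k, v) :: t) (pvMax v t) = k :: pvKeysWith t (pvMax v t) := by
            simp [pvKeysWith, hv]
          rw [this, if_pos hv]
          have : pvAddAll (PySem.Set.ofList []) (k :: pvKeysWith t (pvMax v t)) =
              pvAddAll (PySem.Set.ofList [k]) (pvKeysWith t (pvMax v t)) := rfl
          rw [this]
        · have hvne : v ≠ pvMax v t := fun h => hv h.symm
          have : pvKeysWith ((k, v) :: t) (pvMax v t) = pvKeysWith t (pvMax v t) := by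
            simp [pvKeysWith, hvne]
          rw [this, if_neg hv]
      · -- v = m : add
        subst heq
        have hstep : pvStep (m, s) (k, m) = (m, PySem.Set.add s k) := by
          simp [pvStep]
        rw [hstep, ih]
        have hmax : pvMax m ((k, m) :: t) = pvMax m t := by simp [pvMax]
        have hge : m ≤ pvMax m t := pvMax_ge t m
        rw [hmax]
        by_cases hv : pvMax m t = m
        · have : pvKeysWith ((k, m) :: t) (pvMax m t) = k :: pvKeysWith t (pvMax m t) := by
            simp [pvKeysWith, hv]
          rw [this, if_pos hv, if_pos hv]
          rfl
        · have hvne : m ≠ pvMax m t := fun h => hv h.symm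
          have : pvKeysWith ((k, m) :: t) (pvMax m t) = pvKeysWith t (pvMax m t) := by
            simp [pvKeysWith, hvne]
          rw [this, if_neg hv, if_neg hv]
      · -- v < m : skip
        have hstep : pvStep (m, s) (k, v) = (m, s) := by
          simp only [pvStep]
          rw [if_neg (by omega), if_neg (by simp only [beq_iff_eq]; omega)]
        rw [hstep, ih]
        have hmax : pvMax m ((k, v) :: t) = pvMax m t := by
          simp only [pvMax, List.foldl_cons]
          rw [if_neg (by omega)]
        have hge : m ≤ pvMax m t := pvMax_ge t m
        have hvne : v ≠ pvMax m t := by omega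
        rw [hmax]
        have : pvKeysWith ((k, v) :: t) (pvMax m t) = pvKeysWith t (pvMax m t) := by
          simp [pvKeysWith, hvne]
        rw [this]

lemma pvA_collect (l : List (String × Int)) (M : Int) :
    ∀ s : PySem.Set String,
      l.foldl (fun vr kv => if kv.2 == M then PySem.Set.add vr kv.1 else vr) s =
        pvAddAll s (pvKeysWith l M) := by
  induction l with
  | nil => intro s; simp [pvKeysWith, pvAddAll]
  | cons kv t ih =>
      intro s
      simp only [List.foldl_cons]
      by_cases h : kv.2 = M
      · rw [if_pos (by simpa using h), ih]
        have : pvKeysWith (kv :: t) M = kv.1 :: pvKeysWith t M := by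
          simp [pvKeysWith, h]
        rw [this]
        rfl
      · rw [if_neg (by simpa using h), ih]
        have : pvKeysWith (kv :: t) M = pvKeysWith t M := by
          simp [pvKeysWith, h]
        rw [this]

lemma pv_get?_of_mem {dic : List (String × Int)} (hnd : (dic.map Prod.fst).Nodup)
    {kv : String × Int} (hm : kv ∈ dic) :
    (PySem.Dict.mk dic).get? kv.1 = some kv.2 := by
  apply PySem.Dict.get?_of_mem_items
  · exact hm
  · simpa [PySem.Dict.keys] using hnd

-- ===== VERDICT (by name: the statement is the Claim_ definition above) =====
theorem maximo_valor_entero_spec : Claim_equal_maximo_valor_entero := by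
  intro dic _ hpre
  unfold Spec_maximo_valor_entero
  have hB : maximo_valor_entero_alt dic =
      pvAddAll (PySem.Set.ofList []) (pvKeysWith dic (pvMax 0 dic)) := by
    show (dic.foldl pvStep ((0 : Int), PySem.Set.ofList [])).2 = _
    rw [pvB_inv]
    split <;> rfl
  have hA : maximo_valor_entero dic =
      pvAddAll (PySem.Set.ofList []) (pvKeysWith dic (pvMax 0 dic)) := by
    show dic.foldl
        (fun vr kv =>
          if (PySem.Dict.mk dic).get? kv.1 == some (pvMax 0 dic) then PySem.Set.add vr kv.1
          else vr)
        (PySem.Set.ofList []) = _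
    have hcongr := PySem.List.foldl_congr_mem (l := dic)
      (init := (PySem.Set.ofList [] : PySem.Set String))
      (f := fun vr kv =>
        if (PySem.Dict.mk dic).get? kv.1 == some (pvMax 0 dic) then PySem.Set.add vr kv.1 else vr)
      (g := fun vr kv =>
        if kv.2 == pvMax 0 dic then PySem.Set.add vr kv.1 else vr)
      (by
        intro acc kv hm
        simp only []
        rw [pv_get?_of_mem hpre hm]
        simp)
    rw [hcongr]
    exact pvA_collect dic (pvMax 0 dic) _
  rw [hA, hB]
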